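-- pv_equiv track=rewrite | github.com/pypi-data/pypi-mirror-113 | packages/barwet/barwet-0.1.11.tar.gz/barwet-0.1.11/barwet/utils/latest_version.py | get_latest_index
-- ===== SOURCE A (Python) =====
-- from typing import Dict, Sequence
--
-- def get_latest_index(versions: Sequence[Sequence[int]]) -> int:
--     """
--     Args:
--         versions: 多个版本号的数组，每个版本号由一组整数表示
--     Return:
--         最新版本在versions中的索引
--     """
--     max_index = len(versions[0]) - 1
--
--     def _recursive(used: Sequence[int], i: int) -> int:
--         """
--         Args:
--             used: 索引数组，在versions的子集里面查找
--             i: 在每个version的第i个元素里面比较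
--         Return:
--             最新版本在versions中的索引
--         Exceptions:
--             存在多个最新版本时会报错
--         """
--         maxv = -1
--         _versions = []
--         _index = []
--         for vidx,version in enumerate(versions):
--             if vidx not in used or version[i] < maxv:
--                 continue
--             if version[i] > maxv:
--                 maxv = version[i]
--                 _versions = [version]
--                 _index = [vidx]
--             elif version[i] == maxv:
--                 _versions.append(version)
--                 _index.append(vidx)
--
--         if len(_versions) == 1:
--             return _index[0]
--         else:
--             if i == max_index:
--                 raise Exception('Multiple latest versions!')
--             return _recursive(_index, i + 1)
--
--     return _recursive(list(range(len(versions))), 0)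
-- ===== SOURCE B (Python) =====
-- def get_latest_index(versions):
--     """Same result as A on its normal domain: index of the unique lexicographically
--     greatest version, truncated to len(versions[0]) entries; raise on a tie."""
--     length = len(versions[0])
--     keys = [[v[i] for i in range(length)] for v in versions]
--     best = max(keys)
--     if keys.count(best) > 1:
--         raise Exception('Multiple latest versions!')
--     return keys.index(best)
-- ===== Notes on version B (the rewrite author's own statement) =====
-- stated objective: simpler
-- what changed: Replaced A's per-column recursive elimination (with a -1 sentinel running max per column) by a single pass: build each version's truncated key, take the lexicographic maximum with built-in max, raise if it occurs twice, else return its index.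
-- outside the precondition, e.g. on get_latest_index([[2, 1], [1]]): A returns 0, B raises IndexError
import Mathlib
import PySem

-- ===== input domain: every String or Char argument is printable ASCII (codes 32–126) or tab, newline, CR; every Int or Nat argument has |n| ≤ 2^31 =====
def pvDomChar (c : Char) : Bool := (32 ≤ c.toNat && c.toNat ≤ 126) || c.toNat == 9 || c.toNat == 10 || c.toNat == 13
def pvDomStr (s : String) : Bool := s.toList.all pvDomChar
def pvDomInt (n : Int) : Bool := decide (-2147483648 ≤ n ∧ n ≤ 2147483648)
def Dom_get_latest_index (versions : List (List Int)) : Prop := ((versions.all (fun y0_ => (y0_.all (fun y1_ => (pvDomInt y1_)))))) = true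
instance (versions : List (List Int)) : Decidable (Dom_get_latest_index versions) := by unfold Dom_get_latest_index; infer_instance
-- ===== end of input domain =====

-- B replaces A's per-column recursive elimination by: build truncated keys, take the
-- lexicographic max, raise on a duplicate max, return its index (objective: simpler).

-- ===== PORT A =====
-- inner loop body of _recursive: for vidx,version in enumerate(versions): …
-- (short-circuit of 'vidx not in used or version[i] < maxv' kept: version[i] is only
-- read when vidx ∈ used; none = IndexError)
def pvAGo (i : Int) (used : List Int) :
    List (Int × List Int) → Int × List (List Int) × List Int →
    Option (Int × List (List Int) × List Int)
  | [], s => some s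
  | (vidx, version) :: rest, (maxv, vers, idxs) =>
    if vidx ∈ used then
      match PySem.List.pyGet? version i with
      | none => none
      | some x =>
        if x < maxv then pvAGo i used rest (maxv, vers, idxs)
        else if x > maxv then pvAGo i used rest (x, [version], [vidx])
        else pvAGo i used rest (maxv, vers ++ [version], idxs ++ [vidx])
    else pvAGo i used rest (maxv, vers, idxs)

-- _recursive(used, i); none = any raised exception; fuel bounds the recursion depth
-- (the Python recursion takes at most len(versions[0]) steps since i stops at max_index)
def pvARec (versions : List (List Int)) (max_index : Int) :
    Nat → List Int → Int → Option Int
  | 0, _, _ => none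
  | fuel + 1, used, i =>
    match pvAGo i used (PySem.List.enumerate versions 0) (-1, [], []) with
    | none => none
    | some (_maxv, vers, idxs) =>
      if vers.length = 1 then PySem.List.pyGet? idxs 0
      else if i = max_index then none
      else pvARec versions max_index fuel idxs (i + 1)

def get_latest_index (versions : List (List Int)) : Int :=
  match PySem.List.pyGet? versions 0 with
  | none => 0   -- versions[0] raised IndexError (outside Pre_)
  | some v0 =>
    (pvARec versions ((v0.length : Int) - 1) (v0.length + 1)
        (PySem.List.pyRange 0 (PySem.List.len versions) 1) 0).getD 0

-- ===== PORT B =====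
-- [v[i] for i in idxs]  (none = IndexError on a too-short version)
def pvBKey (v : List Int) : List Nat → Option (List Int)
  | [] => some []
  | j :: rest =>
    match PySem.List.pyGet? v (j : Int) with
    | none => none
    | some x => (pvBKey v rest).map (x :: ·)

-- [[v[i] for i in range(L)] for v in versions]
def pvKeys (L : Nat) : List (List Int) → Option (List (List Int))
  | [] => some []
  | v :: rest =>
    match pvBKey v (List.range L) with
    | none => none
    | some k => (pvKeys L rest).map (k :: ·)

-- Python's '<' on lists of ints (lexicographic)
def pvListLt : List Int → List Int → Bool
  | _, [] => false
  | [], _ :: _ => true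
  | a :: as_, b :: bs => if a < b then true else if b < a then false else pvListLt as_ bs

def get_latest_index_alt (versions : List (List Int)) : Int :=
  match versions with
  | [] => 0                                  -- len(versions[0]) raised IndexError
  | v0 :: _ =>
    match pvKeys v0.length versions with
    | none => 0                              -- IndexError while building a key
    | some keys =>
      match keys with
      | [] => 0                              -- unreachable: keys is nonempty here
      | k0 :: krest =>
        let best := krest.foldl (fun acc k => if pvListLt acc k then k else acc) k0
        if 1 < PySem.List.count keys best then 0   -- raise Exception('Multiple latest versions!')
        else ((PySem.List.index? keys best).getD 0 : Int)

-- ===== PRECONDITION & SPEC =====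
-- Pre_ = inputs on which A returns normally: a nonempty first version, every version at
-- least as long as versions[0] (A can return on a too-short version it eliminates before
-- reading its missing entry; such inputs are excluded — see claim cites), a unique
-- lexicographically maximal truncated key M, and M's entry ≥ -1 at the first column and
-- at every column still contested by ≥ 2 keys (below -1 A's sentinel makes it raise).
def pvKeysOf (versions : List (List Int)) : List (List Int) :=
  versions.map (fun v => v.take (versions.headD []).length)

def Pre_get_latest_index (versions : List (List Int)) : Prop :=
  versions ≠ [] ∧ 1 ≤ (versions.headD []).length ∧
  (∀ v ∈ versions, (versions.headD []).length ≤ v.length) ∧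
  ∃ M ∈ pvKeysOf versions,
    (∀ k ∈ pvKeysOf versions, pvListLt M k = false) ∧
    (pvKeysOf versions).count M = 1 ∧
    ∀ i < (versions.headD []).length,
      (i = 0 ∨ 2 ≤ ((pvKeysOf versions).filter (fun k => k.take i == M.take i)).length) →
      -1 ≤ M.getD i 0
instance (versions : List (List Int)) : Decidable (Pre_get_latest_index versions) := by
  unfold Pre_get_latest_index; infer_instance

def pvWitness_get_latest_index : List (List Int) := [[2], [1]]

def Spec_get_latest_index (versions : List (List Int)) (out : Int) : Prop := out = get_latest_index_alt versions
instance (versions : List (List Int)) (out : Int) : Decidable (Spec_get_latest_index versions out) := by unfold Spec_get_latest_index; infer_instance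

-- ===== CLAIM (what is proved, stated in full; the proofs are below) =====
def Claim_equal_get_latest_index : Prop := ∀ (versions : List (List Int)), Dom_get_latest_index versions → Pre_get_latest_index versions → Spec_get_latest_index versions (get_latest_index versions)
-- ===== LEMMAS AND PROOFS =====

theorem pvListLt_irrefl (a : List Int) : pvListLt a a = false := by
  induction a with
  | nil => rfl
  | cons x t ih => simp [pvListLt, ih]

theorem pvListLt_conn (a b : List Int) (hab : pvListLt a b = false) (hba : pvListLt b a = false) : a = b := by
  induction a generalizing b with
  | nil => cases b with
    | nil => rfl
    | cons y t => simp [pvListLt] at hab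
  | cons x t ih =>
    cases b with
    | nil => simp [pvListLt] at hba
    | cons y s =>
      simp only [pvListLt] at hab hba
      by_cases h1 : x < y
      · simp [h1] at hab
      · by_cases h2 : y < x
        · simp [h1, h2] at hba
        · have : x = y := le_antisymm (not_lt.1 h2) (not_lt.1 h1)
          subst this
          simp [h1, h2, lt_irrefl] at hab hba
          rw [ih s hab hba]

theorem pvListLt_false_trans (a b c : List Int) (hab : pvListLt a b = false) (hbc : pvListLt b c = false) : pvListLt a c = false := by
  induction a generalizing b c with
  | nil =>
    cases c with
    | nil => rfl
    | cons z u =>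
      cases b with
      | nil => simpa [pvListLt] using hbc
      | cons y t => simp [pvListLt] at hab
  | cons x t ih =>
    cases c with
    | nil => rfl
    | cons z u =>
      cases b with
      | nil => simp [pvListLt] at hbc
      | cons y s =>
        simp only [pvListLt] at hab hbc ⊢
        by_cases h1 : x < y
        · simp [h1] at hab
        · by_cases h2 : y < z
          · simp [h2] at hbc
          · have hzx : z ≤ x := le_trans (not_lt.1 h2) (not_lt.1 h1)
            by_cases h3 : x < z
            · omega
            · simp only [h3, if_false]
              by_cases h4 : z < x
              · simp [h4]
              · have hxy : x = y := by omega
                have hyz : y = z := by omega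
                subst hxy; subst hyz
                simp [lt_irrefl] at hab hbc
                simp [ih s u hab hbc]

theorem pvListLt_asymm (a b : List Int) (h : pvListLt a b = true) : pvListLt b a = false := by
  induction a generalizing b with
  | nil => cases b with
    | nil => simp [pvListLt] at h
    | cons y t => rfl
  | cons x t ih =>
    cases b with
    | nil => simp [pvListLt] at h
    | cons y s =>
      simp only [pvListLt] at h ⊢
      by_cases h1 : x < y
      · simp [h1, not_lt.2 (le_of_lt h1), ne_of_gt h1]
      · by_cases h2 : y < x
        · simp [h1, h2] at h
        · have : x = y := by omega
          subst this
          simp only [lt_irrefl, if_false] at h ⊢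
          exact ih s h

-- the running 'best = max so far' fold of B

theorem pvBest_spec (rest : List (List Int)) : ∀ acc : List Int,
    (rest.foldl (fun a k => if pvListLt a k then k else a) acc = acc ∨
      rest.foldl (fun a k => if pvListLt a k then k else a) acc ∈ rest) ∧
    pvListLt (rest.foldl (fun a k => if pvListLt a k then k else a) acc) acc = false ∧
    ∀ k ∈ rest, pvListLt (rest.foldl (fun a k => if pvListLt a k then k else a) acc) k = false := by
  induction rest with
  | nil => intro acc; exact ⟨Or.inl rfl, pvListLt_irrefl acc, by intro k hk; simp at hk⟩
  | cons k rest ih =>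
    intro acc
    simp only [List.foldl_cons]
    by_cases hlt : pvListLt acc k = true
    · rw [hlt]; simp only [if_true]
      obtain ⟨hmem, hacc', hall⟩ := ih k
      refine ⟨?_, pvListLt_false_trans _ _ _ hacc' (pvListLt_asymm _ _ hlt), ?_⟩
      · rcases hmem with h | h
        · exact Or.inr (by simp [h])
        · exact Or.inr (List.mem_cons_of_mem _ h)
      · intro k' hk'
        rcases List.mem_cons.1 hk' with rfl | h
        · exact hacc'
        · exact hall _ h
    · have hlt' : pvListLt acc k = false := by simpa using hlt
      rw [hlt']
      simp only [Bool.false_eq_true, if_false]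
      obtain ⟨hmem, hacc', hall⟩ := ih acc
      refine ⟨?_, hacc', ?_⟩
      · rcases hmem with h | h
        · exact Or.inl h
        · exact Or.inr (List.mem_cons_of_mem _ h)
      · intro k' hk'
        rcases List.mem_cons.1 hk' with rfl | h
        · exact pvListLt_false_trans _ _ _ hacc' hlt'
        · exact hall _ h

theorem pvBKey_eq (v : List Int) (js : List Nat) (h : ∀ j ∈ js, j < v.length) :
    pvBKey v js = some (js.map (fun j => v.getD j 0)) := by
  induction js with
  | nil => rfl
  | cons j rest ih =>
    have hj : j < v.length := h j (List.mem_cons_self)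
    simp only [pvBKey, PySem.List.pyGet?_natCast, List.getElem?_eq_getElem hj]
    rw [ih (fun x hx => h x (List.mem_cons_of_mem _ hx))]
    simp [List.getD, List.getElem?_eq_getElem hj]

theorem map_getD_range_eq_take (v : List Int) (L : Nat) (h : L ≤ v.length) :
    (List.range L).map (fun j => v.getD j 0) = v.take L := by
  apply List.ext_getElem
  · simp [h]
  · intro i h1 h2
    simp only [List.getElem_map, List.getElem_range, List.getElem_take]
    have : i < v.length := by simp at h1; omega
    simp [List.getD, List.getElem?_eq_getElem this]

theorem pvBKey_range (v : List Int) (L : Nat) (h : L ≤ v.length) :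
    pvBKey v (List.range L) = some (v.take L) := by
  rw [pvBKey_eq v _ (by intro j hj; simpa using List.mem_range.1 hj |>.trans_le h)]
  rw [map_getD_range_eq_take v L h]

def pvColMax (i : Int) (used : List Int) (pairs : List (Int × List Int)) (maxv : Int) : Int :=
  pairs.foldl (fun acc p => if p.1 ∈ used then max acc ((PySem.List.pyGet? p.2 i).getD 0) else acc) maxv

def pvSel (i : Int) (used : List Int) (m : Int) (p : Int × List Int) : Bool :=
  decide (p.1 ∈ used) && ((PySem.List.pyGet? p.2 i).getD 0 == m)

theorem pvColMax_ge (i : Int) (used : List Int) (pairs : List (Int × List Int)) :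
    ∀ maxv, maxv ≤ pvColMax i used pairs maxv := by
  induction pairs with
  | nil => intro maxv; simp [pvColMax]
  | cons p rest ih =>
    intro maxv
    unfold pvColMax at ih ⊢
    simp only [List.foldl_cons]
    by_cases h : p.1 ∈ used
    · simp only [if_pos h]
      exact le_trans (le_max_left _ _) (ih _)
    · simp only [if_neg h]
      exact ih maxv

theorem pvAGo_spec (i : Int) (used : List Int) :
    ∀ (pairs : List (Int × List Int)),
    (∀ p ∈ pairs, p.1 ∈ used → (PySem.List.pyGet? p.2 i).isSome = true) →
    ∀ maxv vers idxs,
    pvAGo i used pairs (maxv, vers, idxs) =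
      some (pvColMax i used pairs maxv,
        (if pvColMax i used pairs maxv = maxv then vers else []) ++
          (pairs.filter (pvSel i used (pvColMax i used pairs maxv))).map (·.2),
        (if pvColMax i used pairs maxv = maxv then idxs else []) ++
          (pairs.filter (pvSel i used (pvColMax i used pairs maxv))).map (·.1)) := by
  intro pairs
  induction pairs with
  | nil => intro _ maxv vers idxs; simp [pvAGo, pvColMax]
  | cons p rest ih =>
    intro hval maxv vers idxs
    obtain ⟨vidx, version⟩ := p
    by_cases h : vidx ∈ used
    · obtain ⟨x, hx⟩ := Option.isSome_iff_exists.1 (hval _ List.mem_cons_self h)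
      have hcm : ∀ mv, pvColMax i used ((vidx, version) :: rest) mv = pvColMax i used rest (max mv x) := by
        intro mv
        unfold pvColMax
        simp [List.foldl_cons, if_pos h, hx]
      have hrest : ∀ p ∈ rest, p.1 ∈ used → (PySem.List.pyGet? p.2 i).isSome = true :=
        fun p hp => hval p (List.mem_cons_of_mem _ hp)
      simp only [pvAGo, if_pos h, hx]
      by_cases hlt : x < maxv
      · have hmax : max maxv x = maxv := by omega
        rw [if_pos hlt, ih hrest, hcm, hmax]
        have hm := pvColMax_ge i used rest maxv
        have hsel : pvSel i used (pvColMax i used rest maxv) (vidx, version) = false := by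
          simp [pvSel, hx]
          intro _
          omega
        simp [List.filter_cons, hsel]
      · by_cases hgt : x > maxv
        · have hmax : max maxv x = x := by omega
          rw [if_neg hlt, if_pos hgt, ih hrest, hcm, hmax]
          have hm := pvColMax_ge i used rest x
          have hne : ¬ pvColMax i used rest x = maxv := by omega
          rw [if_neg hne, if_neg hne]
          by_cases hxm : pvColMax i used rest x = x
          · have hsel : pvSel i used (pvColMax i used rest x) (vidx, version) = true := by
              simp [pvSel, hx, h, hxm]
            rw [hxm] at hsel
            rw [if_pos hxm]
            simp [List.filter_cons, hsel, hxm]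
          · have hsel : pvSel i used (pvColMax i used rest x) (vidx, version) = false := by
              simp [pvSel, hx]
              intro _
              exact fun hc => hxm hc.symm
            rw [if_neg hxm]
            simp [List.filter_cons, hsel, hxm]
        · have hxe : x = maxv := by omega
          subst hxe
          have hmax : max x x = x := by omega
          rw [if_neg hlt, if_neg hgt, ih hrest, hcm, hmax]
          by_cases hm : pvColMax i used rest x = x
          · have hsel : pvSel i used (pvColMax i used rest x) (vidx, version) = true := by
              simp [pvSel, hx, h, hm]
            rw [hm] at hsel
            rw [if_pos hm, if_pos hm, if_pos hm]
            simp [List.filter_cons, hsel, hm]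
          · have hsel : pvSel i used (pvColMax i used rest x) (vidx, version) = false := by
              simp [pvSel, hx]
              intro _
              omega
            rw [if_neg hm, if_neg hm, if_neg hm]
            simp [List.filter_cons, hsel, hm]
    · have hcm : pvColMax i used ((vidx, version) :: rest) maxv = pvColMax i used rest maxv := by
        unfold pvColMax
        simp [List.foldl_cons, if_neg h]
      have hrest : ∀ p ∈ rest, p.1 ∈ used → (PySem.List.pyGet? p.2 i).isSome = true :=
        fun p hp => hval p (List.mem_cons_of_mem _ hp)
      have hsel : pvSel i used (pvColMax i used rest maxv) (vidx, version) = false := by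
        simp [pvSel, h]
      simp only [pvAGo, if_neg h]
      rw [ih hrest, hcm]
      simp [List.filter_cons, hsel]

def pvMT (versions : List (List Int)) (M : List Int) (i : Nat) : List Int :=
  (PySem.List.pyRange 0 (PySem.List.len versions) 1).filter
    (fun q => (PySem.List.pyGetD versions q []).take i == M.take i)

theorem pvGetD_int_eq (versions : List (List Int)) (q : Int) (h0 : 0 ≤ q)
    (h1 : q.toNat < versions.length) :
    PySem.List.pyGetD versions q [] = versions[q.toNat] := by
  rw [PySem.List.pyGetD_of_nonneg _ _ h0]
  exact List.getD_eq_getElem _ _ h1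

theorem mem_pvMT (versions : List (List Int)) (M : List Int) (i : Nat) (q : Int) :
    q ∈ pvMT versions M i ↔
      0 ≤ q ∧ q < versions.length ∧ (PySem.List.pyGetD versions q []).take i = M.take i := by
  unfold pvMT
  rw [List.mem_filter, PySem.List.mem_pyRange_one]
  simp [PySem.List.len, and_assoc]

theorem foldl_max_le_int {α : Type} (l : List α) (f : α → Int) (c : Int) :
    ∀ init : Int, init ≤ c → (∀ x ∈ l, f x ≤ c) →
    l.foldl (fun a x => max a (f x)) init ≤ c := by
  induction l with
  | nil => intro init h0 _; simpa using h0
  | cons x t ih =>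
    intro init h0 h
    simp only [List.foldl_cons]
    exact ih _ (max_le h0 (h x List.mem_cons_self)) (fun y hy => h y (List.mem_cons_of_mem _ hy))

theorem pvLex_bound : ∀ (i : Nat) (M k : List Int), pvListLt M k = false →
    k.take i = M.take i → i < k.length → i < M.length →
    k.getD i 0 ≤ M.getD i 0 := by
  intro i
  induction i with
  | zero =>
    intro M k hlt _ hk hM
    cases M with
    | nil => simp at hM
    | cons m0 M' =>
      cases k with
      | nil => simp at hk
      | cons k0 k' =>
        simp only [pvListLt] at hlt
        by_cases h1 : m0 < k0
        · simp [h1] at hlt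
        · simpa using not_lt.1 h1
  | succ i ih =>
    intro M k hlt htake hk hM
    cases M with
    | nil => simp at hM
    | cons m0 M' =>
      cases k with
      | nil => simp at hk
      | cons k0 k' =>
        simp only [List.take_succ_cons, List.cons.injEq] at htake
        obtain ⟨rfl, htake'⟩ := htake
        simp only [pvListLt, lt_irrefl, if_false] at hlt
        simpa using ih M' k' hlt htake' (by simpa using hk) (by simpa using hM)

theorem pvStage
    (versions : List (List Int)) (v0 : List Int) (hv0 : versions.headD [] = v0)
    (hlen : ∀ v ∈ versions, v0.length ≤ v.length)
    (M : List Int) (hMlen : M.length = v0.length)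
    (hMmax : ∀ k ∈ versions.map (fun v => v.take v0.length), pvListLt M k = false)
    (wq : Nat) (hwq : wq < versions.length)
    (hw : (versions[wq]).take v0.length = M)
    (i : Nat) (hi : i < v0.length) (hMi : -1 ≤ M.getD i 0) :
    ∃ vers, pvAGo (i : Int) (pvMT versions M i) (PySem.List.enumerate versions 0) (-1, [], []) =
        some (M.getD i 0, vers, pvMT versions M (i + 1)) ∧
      vers.length = (pvMT versions M (i + 1)).length := by
  have hgetlen : ∀ q : Int, 0 ≤ q → q < versions.length →
      (PySem.List.pyGetD versions q []) ∈ versions ∧ v0.length ≤ (PySem.List.pyGetD versions q []).length := by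
    intro q h0 h1
    have h1' : q.toNat < versions.length := by omega
    rw [pvGetD_int_eq versions q h0 h1']
    exact ⟨List.getElem_mem _, hlen _ (List.getElem_mem _)⟩
  have hval : ∀ p ∈ (PySem.List.pyRange 0 (PySem.List.len versions) 1).map
      (fun j => (j, PySem.List.pyGetD versions j [])),
      p.1 ∈ pvMT versions M i → (PySem.List.pyGet? p.2 (i : Int)).isSome = true := by
    intro p hp _
    obtain ⟨j, hj, rfl⟩ := List.mem_map.1 hp
    rw [PySem.List.mem_pyRange_one] at hj
    simp only [PySem.List.len] at hj
    have hjlen := (hgetlen j hj.1 (by exact_mod_cast hj.2)).2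
    have : i < (PySem.List.pyGetD versions j []).length := by omega
    simp [PySem.List.pyGet?_natCast, List.getElem?_eq_getElem this]
  rw [PySem.List.enumerate_eq_map_pyRange versions []]
  rw [pvAGo_spec (i : Int) (pvMT versions M i) _ hval (-1) [] []]
  -- characterize the column maximum
  have hcv : ∀ q : Int, 0 ≤ q → q < versions.length →
      (PySem.List.pyGet? (PySem.List.pyGetD versions q []) (i : Int)).getD 0 =
        (PySem.List.pyGetD versions q []).getD i 0 := by
    intro q h0 h1
    have hl := (hgetlen q h0 h1).2
    have hil : i < (PySem.List.pyGetD versions q []).length := by omega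
    rw [PySem.List.pyGet?_natCast, List.getElem?_eq_getElem hil]
    simp [List.getD, List.getElem?_eq_getElem hil]
  have hfold : pvColMax (i : Int) (pvMT versions M i)
      ((PySem.List.pyRange 0 (PySem.List.len versions) 1).map
        (fun j => (j, PySem.List.pyGetD versions j []))) (-1) = M.getD i 0 := by
    unfold pvColMax
    rw [List.foldl_map]
    rw [PySem.List.foldl_ite_eq_foldl_filter (fun j => (j, PySem.List.pyGetD versions j []).1 ∈ pvMT versions M i)
      (fun acc j => max acc ((PySem.List.pyGet? (j, PySem.List.pyGetD versions j []).2 (i : Int)).getD 0))]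
    have hfilt : (PySem.List.pyRange 0 (PySem.List.len versions) 1).filter
        (fun j => decide ((j, PySem.List.pyGetD versions j []).1 ∈ pvMT versions M i)) =
        pvMT versions M i := by
      conv_rhs => rw [pvMT]
      apply List.filter_congr
      intro j hj
      rw [PySem.List.mem_pyRange_one] at hj
      simp only [PySem.List.len] at hj
      have hiff : (j ∈ pvMT versions M i) ↔
          (PySem.List.pyGetD versions j []).take i = M.take i := by
        rw [mem_pvMT]
        exact ⟨fun h => h.2.2, fun h => ⟨hj.1, by exact_mod_cast hj.2, h⟩⟩
      rw [show ((PySem.List.pyGetD versions j []).take i == M.take i) =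
        decide ((PySem.List.pyGetD versions j []).take i = M.take i) from Bool.beq_eq_decide_eq _ _]
      simp [hiff]
    rw [hfilt]
    -- the running max over the surviving indices is M[i]
    have hub : ∀ q ∈ pvMT versions M i,
        (PySem.List.pyGet? (q, PySem.List.pyGetD versions q []).2 (i : Int)).getD 0 ≤ M.getD i 0 := by
      intro q hq
      rw [mem_pvMT] at hq
      obtain ⟨h0, h1, hpre⟩ := hq
      have hl := (hgetlen q h0 h1).2
      rw [hcv q h0 h1]
      have hkmem : (PySem.List.pyGetD versions q []).take v0.length ∈
          versions.map (fun v => v.take v0.length) :=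
        List.mem_map.2 ⟨_, (hgetlen q h0 h1).1, rfl⟩
      have hklen : i < ((PySem.List.pyGetD versions q []).take v0.length).length := by
        simp [List.length_take]; omega
      have hktake : ((PySem.List.pyGetD versions q []).take v0.length).take i =
          M.take i := by
        rw [List.take_take]
        rw [min_eq_left (le_of_lt hi)]
        exact hpre
      have := pvLex_bound i M _ (hMmax _ hkmem) hktake hklen (by omega)
      calc (PySem.List.pyGetD versions q []).getD i 0
          = ((PySem.List.pyGetD versions q []).take v0.length).getD i 0 := by
            rw [List.getD_eq_getElem _ _ (by omega), List.getD_eq_getElem _ _ hklen]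
            simp [List.getElem_take]
        _ ≤ M.getD i 0 := this
    have hwmem : ∀ j : Nat, j ≤ v0.length → ((wq : Int) ∈ pvMT versions M j) := by
      intro j hj
      rw [mem_pvMT]
      refine ⟨by positivity, by exact_mod_cast hwq, ?_⟩
      rw [pvGetD_int_eq versions wq (by positivity) (by simpa using hwq)]
      simp only [Int.toNat_natCast]
      rw [← hw, List.take_take, min_eq_left hj]
    have hcvw : (PySem.List.pyGet? ((wq:Int), PySem.List.pyGetD versions (wq:Int) []).2 (i : Int)).getD 0 = M.getD i 0 := by
      rw [hcv (wq:Int) (by positivity) (by exact_mod_cast hwq)]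
      rw [pvGetD_int_eq versions (wq:Int) (by positivity) (by simpa using hwq)]
      simp only [Int.toNat_natCast]
      rw [← hw]
      have h1 : i < (versions[wq]).length := by
        have := hlen _ (List.getElem_mem hwq); omega
      have h2 : i < ((versions[wq]).take v0.length).length := by
        simp [List.length_take]; omega
      rw [List.getD_eq_getElem _ _ h1, List.getD_eq_getElem _ _ h2]
      simp [List.getElem_take]
    apply le_antisymm
    · exact foldl_max_le_int _ _ _ _ hMi hub
    · have := (PySem.List.le_foldl_max_int (pvMT versions M i)
        (fun j => (PySem.List.pyGet? (j, PySem.List.pyGetD versions j []).2 (i : Int)).getD 0) (-1)).2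
        _ (hwmem i (le_of_lt hi))
      rw [hcvw] at this
      exact this
  -- now the surviving index list is pvMT (i+1)
  have h3 : ((PySem.List.pyRange 0 (PySem.List.len versions) 1).map
        (fun j => (j, PySem.List.pyGetD versions j []))).filter
        (pvSel (i : Int) (pvMT versions M i) (M.getD i 0)) =
      (pvMT versions M (i+1)).map
        (fun j => (j, PySem.List.pyGetD versions j [])) := by
    rw [List.filter_map]
    congr 1
    conv_rhs => rw [pvMT]
    apply List.filter_congr
    intro j hj
    rw [PySem.List.mem_pyRange_one] at hj
    simp only [PySem.List.len] at hj
    have h0 : (0:Int) ≤ j := hj.1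
    have h1 : j < versions.length := by exact_mod_cast hj.2
    have hl := (hgetlen j h0 h1).2
    simp only [Function.comp, pvSel]
    rw [hcv j h0 h1]
    have hiv : i < (PySem.List.pyGetD versions j []).length := by omega
    have hiM : i < M.length := by omega
    rw [Bool.and_comm]
    by_cases hmem : j ∈ pvMT versions M i
    · have hpre : (PySem.List.pyGetD versions j []).take i = M.take i :=
        ((mem_pvMT versions M i j).1 hmem).2.2
      simp only [decide_eq_true hmem, Bool.and_true]
      rw [List.take_succ, List.take_succ]
      rw [List.getElem?_eq_getElem hiv, List.getElem?_eq_getElem hiM]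
      simp only [Option.toList_some]
      rw [hpre]
      rw [List.getD_eq_getElem _ _ hiv, List.getD_eq_getElem _ _ hiM]
      cases h : ((PySem.List.pyGetD versions j [])[i] == M[i]) with
      | true =>
        simp only [beq_iff_eq] at h
        rw [h]
        exact (beq_self_eq_true _).symm
      | false =>
        simp only [beq_eq_false_iff_ne, ne_eq] at h
        symm
        simp only [beq_eq_false_iff_ne, ne_eq]
        intro hc
        exact h (by simpa using List.append_inj_right hc rfl)
    · have hnpre : ¬ (PySem.List.pyGetD versions j []).take i = M.take i := by
        intro hc
        exact hmem ((mem_pvMT versions M i j).2 ⟨h0, h1, hc⟩)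
      simp only [decide_eq_false hmem, Bool.and_false]
      symm
      simp only [beq_eq_false_iff_ne, ne_eq]
      intro hc
      apply hnpre
      have h2 := congrArg (List.take i) hc
      rw [List.take_take, List.take_take] at h2
      have hmin : min i (i + 1) = i := by omega
      rw [hmin] at h2
      exact h2
  rw [hfold, h3]
  simp only [List.map_map, ite_self, List.nil_append]
  have hid : ((fun x => x.1) ∘ (fun j : Int => (j, PySem.List.pyGetD versions j [])) : Int → Int) = id := rfl
  rw [hid, List.map_id]
  exact ⟨_, rfl, by simp⟩

theorem pvARec_spec
    (versions : List (List Int)) (v0 : List Int) (hv0 : versions.headD [] = v0)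
    (hlen : ∀ v ∈ versions, v0.length ≤ v.length)
    (M : List Int) (hMlen : M.length = v0.length)
    (hMmax : ∀ k ∈ versions.map (fun v => v.take v0.length), pvListLt M k = false)
    (wq : Nat) (hwq : wq < versions.length)
    (hw : (versions[wq]).take v0.length = M)
    (huniq : ∀ (q : Nat) (h : q < versions.length), (versions[q]).take v0.length = M → q = wq)
    (hsent : ∀ i < v0.length, (i = 0 ∨ 2 ≤ (pvMT versions M i).length) → -1 ≤ M.getD i 0) :
    ∀ (fuel : Nat) (i : Nat), i < v0.length → v0.length ≤ fuel + i →
    (i = 0 ∨ 2 ≤ (pvMT versions M i).length) →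
    pvARec versions ((v0.length : Int) - 1) fuel (pvMT versions M i) (i : Int) = some (wq : Int) := by
  intro fuel
  induction fuel with
  | zero => intro i hi hfu _; omega
  | succ fuel ih =>
    intro i hi hfu hstage
    obtain ⟨vers, hgo, hlenvers⟩ := pvStage versions v0 hv0 hlen M hMlen hMmax wq hwq hw
      i hi (hsent i hi hstage)
    simp only [pvARec, hgo]
    have hwmem : (wq : Int) ∈ pvMT versions M (i + 1) := by
      rw [mem_pvMT]
      refine ⟨by positivity, by exact_mod_cast hwq, ?_⟩
      rw [pvGetD_int_eq versions wq (by positivity) (by simpa using hwq)]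
      simp only [Int.toNat_natCast]
      rw [← hw, List.take_take]
      congr 1
      omega
    by_cases hone : (pvMT versions M (i + 1)).length = 1
    · rw [if_pos (by rw [hlenvers]; exact hone)]
      obtain ⟨x, hx⟩ := List.length_eq_one_iff.1 hone
      rw [hx] at hwmem
      simp only [List.mem_singleton] at hwmem
      rw [hx, ← hwmem]
      exact PySem.List.pyGet?_zero_cons _ _
    · rw [if_neg (by rw [hlenvers]; exact hone)]
      have hge2 : 2 ≤ (pvMT versions M (i + 1)).length := by
        have : (pvMT versions M (i + 1)).length ≠ 0 := by
          intro hc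
          rw [List.length_eq_zero_iff] at hc
          rw [hc] at hwmem
          simp at hwmem
        omega
      have hi1 : i + 1 < v0.length := by
        by_contra hc
        have hieq : i + 1 = v0.length := by omega
        -- at the final column the survivors are exactly the indices whose key is M: unique
        have hne1 : pvMT versions M (i+1) ≠ [] := by
          intro hc; rw [hc] at hge2; simp at hge2
        obtain ⟨a, r, har⟩ := List.exists_cons_of_ne_nil hne1
        have hne2 : r ≠ [] := by
          intro hc; rw [har, hc] at hge2; simp at hge2
        obtain ⟨b, t, hbt⟩ := List.exists_cons_of_ne_nil hne2
        have habt : pvMT versions M (i+1) = a :: b :: t := by rw [har, hbt]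
        have hnd : (pvMT versions M (i+1)).Nodup :=
          List.Nodup.filter _ (PySem.List.nodup_pyRange_one 0 versions.length)
        have hab : a ≠ b := by
          rw [habt] at hnd
          simp [List.nodup_cons] at hnd
          exact fun hc => hnd.1.1 (hc ▸ rfl)
        have hfin : ∀ q ∈ pvMT versions M (i+1), q = (wq : Int) := by
          intro q hq
          rw [mem_pvMT] at hq
          obtain ⟨h0, h1, hpre⟩ := hq
          have h1' : q.toNat < versions.length := by omega
          rw [pvGetD_int_eq versions q h0 h1'] at hpre
          rw [hieq] at hpre
          rw [show M.take v0.length = M from by rw [← hMlen]; exact List.take_length] at hpre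
          have := huniq q.toNat h1' hpre
          omega
        have ha := hfin a (by rw [habt]; exact List.mem_cons_self)
        have hb := hfin b (by rw [habt]; exact List.mem_cons_of_mem _ List.mem_cons_self)
        exact hab (ha.trans hb.symm)
      rw [if_neg (by intro hc; omega)]
      have : ((i : Int) + 1) = ((i + 1 : Nat) : Int) := by push_cast; ring
      rw [this]
      exact ih (i + 1) hi1 (by omega) (Or.inr hge2)

theorem pvTwo_le_count (l : List (List Int)) (a : List Int) (i j : Nat)
    (h1 : i < l.length) (h2 : j < l.length) (hij : i ≠ j)
    (e1 : l[i] = a) (e2 : l[j] = a) : 2 ≤ l.count a := by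
  have hinst : @List.count (List Int) instBEqOfDecidableEq a l = l.count a := by
    unfold List.count
    apply List.countP_congr
    intro x _
    simp only [beq_iff_eq]
  rw [← hinst, ← List.duplicate_iff_two_le_count, List.duplicate_iff_exists_distinct_get]
  rcases Nat.lt_or_ge i j with h | h
  · exact ⟨⟨i, h1⟩, ⟨j, h2⟩, Fin.mk_lt_mk.2 h, by simp [e1], by simp [e2]⟩
  · exact ⟨⟨j, h2⟩, ⟨i, h1⟩, Fin.mk_lt_mk.2 (by omega), by simp [e2], by simp [e1]⟩

theorem pvKeys_eq (L : Nat) (vl : List (List Int)) (h : ∀ v ∈ vl, L ≤ v.length) :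
    pvKeys L vl = some (vl.map (fun v => v.take L)) := by
  induction vl with
  | nil => rfl
  | cons v rest ih =>
    simp only [pvKeys, pvBKey_range v L (h v List.mem_cons_self)]
    rw [ih (fun x hx => h x (List.mem_cons_of_mem _ hx))]
    rfl

theorem pv_main : ∀ (versions : List (List Int)),
    Pre_get_latest_index versions → get_latest_index versions = get_latest_index_alt versions := by
  intro versions hpre
  obtain ⟨hne, hL1, hlen, M, hMmem, hMmax, hcount, hsent⟩ := hpre
  obtain ⟨v0, vs, rfl⟩ := List.exists_cons_of_ne_nil hne
  have hhead : (v0 :: vs).headD [] = v0 := rfl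
  rw [hhead] at hL1 hlen
  have hkof : pvKeysOf (v0 :: vs) = (v0 :: vs).map (fun v => v.take v0.length) := rfl
  rw [hkof] at hMmem hMmax hcount
  -- facts about M and its unique position wq
  obtain ⟨vM, hvM, hMeq⟩ := List.mem_map.1 hMmem
  have hMlen : M.length = v0.length := by
    rw [← hMeq, List.length_take]
    exact min_eq_left (hlen vM hvM)
  have hsome : (PySem.List.index? ((v0 :: vs).map (fun v => v.take v0.length)) M).isSome := by
    rw [PySem.List.index?_isSome_iff]
    exact hMmem
  obtain ⟨wq, hidx⟩ := Option.isSome_iff_exists.1 hsome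
  obtain ⟨hwq, hkw, hearlier⟩ := PySem.List.getElem_of_index?_eq_some hidx
  have hwq' : wq < (v0 :: vs).length := by simpa using hwq
  have hw : ((v0 :: vs)[wq]'(by simpa using hwq)).take v0.length = M := by
    rw [← hkw, List.getElem_map]
  have huniq : ∀ (q : Nat) (h : q < (v0 :: vs).length),
      ((v0 :: vs)[q]).take v0.length = M → q = wq := by
    intro q hq hqM
    by_contra hqne
    have hq' : q < ((v0 :: vs).map (fun v => v.take v0.length)).length := by simpa using hq
    have e1 : ((v0 :: vs).map (fun v => v.take v0.length))[q] = M := by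
      rw [List.getElem_map]; exact hqM
    have := pvTwo_le_count _ M q wq hq' hwq hqne e1 hkw
    omega
  -- bridge Pre_'s contested-count to the pvMT length
  have hflen : ∀ i, i < v0.length →
      (((v0 :: vs).map (fun v => v.take v0.length)).filter
        (fun k => k.take i == M.take i)).length = (pvMT (v0 :: vs) M i).length := by
    intro i hi
    have hkm : (v0 :: vs).map (fun v => v.take v0.length) =
        (PySem.List.pyRange 0 (PySem.List.len (v0 :: vs)) 1).map
          (fun q => (PySem.List.pyGetD (v0 :: vs) q []).take v0.length) := by
      conv_lhs => rw [← PySem.List.map_pyGetD_pyRange_zero (v0 :: vs) []]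
      rw [List.map_map]
      rfl
    rw [hkm, List.filter_map, List.length_map]
    unfold pvMT
    congr 1
    apply List.filter_congr
    intro q hq
    simp only [Function.comp]
    rw [List.take_take]
    congr 2
    omega
  have hsent' : ∀ i < v0.length, (i = 0 ∨ 2 ≤ (pvMT (v0 :: vs) M i).length) →
      -1 ≤ M.getD i 0 := by
    intro i hi hc
    apply hsent i hi
    rcases hc with h | h
    · exact Or.inl h
    · refine Or.inr ?_
      rw [hkof, hflen i hi]
      exact h
  -- A side
  have hA : get_latest_index (v0 :: vs) = (wq : Int) := by
    simp only [get_latest_index, PySem.List.pyGet?_zero_cons]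
    have hmt0 : PySem.List.pyRange 0 (PySem.List.len (v0 :: vs)) 1 = pvMT (v0 :: vs) M 0 := by
      unfold pvMT
      symm
      apply List.filter_eq_self.2
      intro q _
      simp
    rw [hmt0]
    rw [show (0 : Int) = ((0 : Nat) : Int) from rfl]
    rw [pvARec_spec (v0 :: vs) v0 rfl hlen M hMlen hMmax wq hwq' hw huniq hsent'
      (v0.length + 1) 0 (by omega) (by omega) (Or.inl rfl)]
    rfl
  -- B side
  have hB : get_latest_index_alt (v0 :: vs) = (wq : Int) := by
    simp only [get_latest_index_alt, pvKeys_eq v0.length (v0 :: vs) hlen, List.map_cons]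
    obtain ⟨hbmem, hbacc, hball⟩ := pvBest_spec (vs.map (fun v => v.take v0.length)) (v0.take v0.length)
    have hbmem' : (vs.map (fun v => v.take v0.length)).foldl
        (fun a k => if pvListLt a k then k else a) (v0.take v0.length) ∈
        (v0 :: vs).map (fun v => v.take v0.length) := by
      rcases hbmem with h | h
      · rw [h]; simp
      · simp only [List.map_cons]
        exact List.mem_cons_of_mem _ h
    have hbest : (vs.map (fun v => v.take v0.length)).foldl
        (fun a k => if pvListLt a k then k else a) (v0.take v0.length) = M := by
      symm
      apply pvListLt_conn
      · exact hMmax _ hbmem'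
      · rcases List.mem_cons.1 hMmem with h | h
        · rw [h]; exact hbacc
        · exact hball _ h
    rw [hbest]
    have hcnt : PySem.List.count ((v0.take v0.length) :: vs.map (fun v => v.take v0.length)) M = 1 := by
      rw [PySem.List.count_eq]
      simpa using hcount
    rw [hcnt]
    have hix : PySem.List.index? ((v0.take v0.length) :: vs.map (fun v => v.take v0.length)) M = some wq := by
      simpa using hidx
    split_ifs with hone
    · omega
    · rw [hix]
      rfl
  rw [hA, hB]

-- ===== VERDICT =====
theorem get_latest_index_spec : Claim_equal_get_latest_index := by
  intro versions _ hpre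
  exact pv_main versions hpre
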